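-- pv_equiv track=rewrite | github.com/LuisAlexisSalazar/back_visualizadorMolecular | alignmentAlgorithms/Matriz Local/Meddleman.py | get_bool_list
-- ===== SOURCE A (Python) =====
-- def get_bool_list(way):
--     index = way[0]
--     list_bool = []
--
--     for next_node in way:
--         index_diagonal = (index[0] - 1, index[1] - 1)
--         if index_diagonal[0] == next_node[0] and index_diagonal[1] == next_node[1]:
--             list_bool.append(1)
--         else:
--             list_bool.append(0)
--         index = next_node
--     return list_bool
-- ===== SOURCE B (Python) =====
-- def get_bool_list(way):
--     xs = [p[0] for p in way]
--     ys = [p[1] for p in way]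
--     drop1_x = [0] + [1 if a - b == 1 else 0 for a, b in zip(xs, xs[1:])]
--     drop1_y = [0] + [1 if a - b == 1 else 0 for a, b in zip(ys, ys[1:])]
--     return [a & b for a, b in zip(drop1_x, drop1_y)]
-- ===== Notes on version B (the rewrite author's own statement) =====
-- stated objective: alternative
-- what changed: Instead of one loop threading a previous-node accumulator and comparing node pairs, B unzips the path into the two coordinate sequences, computes in separate staged passes a drop-by-one marker list per coordinate (each with a leading 0), and combines them elementwise with bitwise AND.
import Mathlib
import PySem

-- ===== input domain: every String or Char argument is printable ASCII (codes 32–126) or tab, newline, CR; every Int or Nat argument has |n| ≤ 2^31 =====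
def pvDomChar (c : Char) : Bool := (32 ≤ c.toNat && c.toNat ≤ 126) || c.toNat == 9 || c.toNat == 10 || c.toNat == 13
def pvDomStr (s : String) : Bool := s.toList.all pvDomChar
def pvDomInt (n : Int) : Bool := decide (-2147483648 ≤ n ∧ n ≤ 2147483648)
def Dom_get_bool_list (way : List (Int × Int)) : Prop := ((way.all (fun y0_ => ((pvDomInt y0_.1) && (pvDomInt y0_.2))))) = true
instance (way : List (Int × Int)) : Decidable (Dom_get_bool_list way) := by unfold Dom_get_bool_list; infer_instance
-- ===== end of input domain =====

-- B replaces A's single loop with a previous-node accumulator by staged passes over the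
-- unzipped coordinate sequences, combined elementwise with bitwise AND (alternative decomposition, same cost).

-- ===== PORT A =====
-- A: index = way[0] (IndexError on []), then a loop appending 1/0 while threading `index`.
def get_bool_list (way : List (Int × Int)) : List Int :=
  match PySem.List.pyGet? way 0 with
  | none => []   -- Python raises IndexError here; excluded by Pre_
  | some index0 =>
    (way.foldl
      (fun (st : (Int × Int) × List Int) next_node =>
        let index_diagonal := (st.1.1 - 1, st.1.2 - 1)
        if index_diagonal.1 = next_node.1 ∧ index_diagonal.2 = next_node.2 then
          (next_node, st.2 ++ [1])
        else
          (next_node, st.2 ++ [0]))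
      (index0, [])).2

-- ===== PORT B =====
-- B: unzip into xs/ys, per-coordinate drop-by-one marker lists (leading 0), then elementwise a & b.
def get_bool_list_alt (way : List (Int × Int)) : List Int :=
  let xs := way.map (fun p => p.1)
  let ys := way.map (fun p => p.2)
  let drop1_x := [0] ++ (xs.zip (xs.drop 1)).map (fun ab => if ab.1 - ab.2 = 1 then (1 : Int) else 0)
  let drop1_y := [0] ++ (ys.zip (ys.drop 1)).map (fun ab => if ab.1 - ab.2 = 1 then (1 : Int) else 0)
  (drop1_x.zip drop1_y).map (fun ab => Int.land ab.1 ab.2)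

-- ===== PRECONDITION & SPEC =====
-- Pre_ excludes only the empty list, on which A raises IndexError.
def Pre_get_bool_list (way : List (Int × Int)) : Prop := way ≠ []
instance (way : List (Int × Int)) : Decidable (Pre_get_bool_list way) := by unfold Pre_get_bool_list; infer_instance
def pvWitness_get_bool_list : (List (Int × Int)) := [(3, 3), (2, 2), (2, 1)]

def Spec_get_bool_list (way : List (Int × Int)) (out : List Int) : Prop := out = get_bool_list_alt way
instance (way : List (Int × Int)) (out : List Int) : Decidable (Spec_get_bool_list way out) := by unfold Spec_get_bool_list; infer_instance

-- ===== CLAIM =====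
def Claim_equal_get_bool_list : Prop := ∀ (way : List (Int × Int)), Dom_get_bool_list way → Pre_get_bool_list way → Spec_get_bool_list way (get_bool_list way)

-- ===== LEMMAS AND PROOFS =====

-- the step value A appends for a previous/current pair
def pvStep (p c : Int × Int) : Int :=
  if p.1 - 1 = c.1 ∧ p.2 - 1 = c.2 then 1 else 0

-- A's loop body, named for the lemma
def pvBody (st : (Int × Int) × List Int) (next_node : Int × Int) : (Int × Int) × List Int :=
  let index_diagonal := (st.1.1 - 1, st.1.2 - 1)
  if index_diagonal.1 = next_node.1 ∧ index_diagonal.2 = next_node.2 then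
    (next_node, st.2 ++ [1])
  else
    (next_node, st.2 ++ [0])

theorem pvBody_eq (st : (Int × Int) × List Int) (c : Int × Int) :
    pvBody st c = (c, st.2 ++ [pvStep st.1 c]) := by
  unfold pvBody pvStep
  dsimp only
  split_ifs <;> rfl

theorem loop_eq (l : List (Int × Int)) : ∀ (prev : Int × Int) (acc : List Int),
    (l.foldl pvBody (prev, acc)).2 = acc ++ ((prev :: l).zip l).map (fun pc => pvStep pc.1 pc.2) := by
  induction l with
  | nil => intro prev acc; simp
  | cons c t ih =>
    intro prev acc
    simp only [List.foldl_cons, pvBody_eq, ih, List.zip_cons_cons, List.map_cons]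
    simp

-- the elementwise AND of the two per-coordinate markers is A's pairwise step value
theorem land_step (p c : Int × Int) :
    Int.land (if p.1 - c.1 = 1 then (1 : Int) else 0) (if p.2 - c.2 = 1 then (1 : Int) else 0)
      = pvStep p c := by
  unfold pvStep
  split_ifs <;> first | decide | omega

theorem zip_self {α : Type} (m : List α) : m.zip m = m.map (fun x => (x, x)) := by
  induction m with
  | nil => rfl
  | cons a t ih => simp [List.zip_cons_cons, ih]

-- B computes the leading 0 followed by the pairwise step values
theorem alt_eq (l : List (Int × Int)) :
    get_bool_list_alt l = 0 :: (l.zip (l.drop 1)).map (fun pc => pvStep pc.1 pc.2) := by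
  unfold get_bool_list_alt
  simp only [← List.map_drop, List.zip_map, List.map_map, List.cons_append,
    List.nil_append, List.zip_cons_cons, List.map_cons, zip_self]
  congr 1
  apply List.map_congr_left
  intro pc _
  simpa using land_step pc.1 pc.2

-- ===== VERDICT =====
theorem get_bool_list_spec : Claim_equal_get_bool_list := by
  intro way _ hpre
  unfold Spec_get_bool_list
  match way, hpre with
  | x :: t, _ =>
    rw [alt_eq]
    unfold get_bool_list
    have h0 : PySem.List.pyGet? (x :: t) 0 = some x := by
      simp [PySem.List.pyGet?, PySem.List.pyIdx?]
    rw [h0]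
    have hb : (fun (st : (Int × Int) × List Int) next_node =>
        let index_diagonal := (st.1.1 - 1, st.1.2 - 1)
        if index_diagonal.1 = next_node.1 ∧ index_diagonal.2 = next_node.2 then
          (next_node, st.2 ++ [1])
        else
          (next_node, st.2 ++ [0])) = pvBody := rfl
    rw [hb]
    show (List.foldl pvBody (x, []) (x :: t)).2 = _
    rw [loop_eq]
    simp only [List.zip_cons_cons, List.map_cons, List.drop_one, List.tail_cons, List.nil_append]
    congr 1
    unfold pvStep
    split_ifs with h
    · exfalso; omega
    · rfl
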